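-- pv_equiv track=rewrite | github.com/yunzhewong/Advent-of-Code-2024 | 9/9.py | combine_empties
-- ===== SOURCE A (Python) =====
-- from typing import Callable, Dict, List, Tuple
--
-- def combine_empties(disk_map: List[Tuple[int, int]]):
--     unemptied = []
--
--     running_count = 0
--     for pair in disk_map:
--         count, item = pair
--
--         if item != -1:
--             if running_count != 0:
--                 unemptied.append((running_count, -1))
--                 running_count = 0
--             unemptied.append(pair)
--         else:
--             running_count += count
--
--     if running_count != 0:
--         unemptied.append((running_count, -1))
--     return unemptied
-- ===== SOURCE B (Python) =====
-- from typing import List, Tuple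
--
-- def combine_empties(disk_map: List[Tuple[int, int]]):
--     # Pass 1: traverse right-to-left, merging each empty pair into the
--     # previously emitted (rightward-adjacent) empty pair; builds the result
--     # in reverse order with no running counter.
--     merged = []
--     for count, item in reversed(disk_map):
--         if item == -1 and merged and merged[-1][1] == -1:
--             merged[-1] = (merged[-1][0] + count, -1)
--         else:
--             merged.append((count, item))
--     merged.reverse()
--     # Pass 2: drop empty runs whose total is zero.
--     return [p for p in merged if p != (0, -1)]
-- ===== Notes on version B (the rewrite author's own statement) =====
-- stated objective: alternative
-- what changed: Instead of a forward scan with a running_count accumulator flushed before each non-empty pair and at the end, B traverses the list right-to-left merging each empty pair into the adjacent already-emitted empty pair (building the output back-to-front), then a separate second pass filters out zero-total empty runs.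
import Mathlib
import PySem

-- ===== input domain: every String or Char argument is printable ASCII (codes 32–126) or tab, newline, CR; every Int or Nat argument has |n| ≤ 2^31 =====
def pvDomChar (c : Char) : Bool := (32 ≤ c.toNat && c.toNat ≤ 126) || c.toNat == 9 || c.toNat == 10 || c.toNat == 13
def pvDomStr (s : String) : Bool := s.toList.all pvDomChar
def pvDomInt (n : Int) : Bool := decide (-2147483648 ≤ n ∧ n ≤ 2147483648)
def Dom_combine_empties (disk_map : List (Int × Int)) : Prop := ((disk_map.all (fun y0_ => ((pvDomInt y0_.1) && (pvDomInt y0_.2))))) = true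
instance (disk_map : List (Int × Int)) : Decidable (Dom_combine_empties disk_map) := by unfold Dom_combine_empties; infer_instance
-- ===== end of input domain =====

-- B replaces A's forward scan with a running_count accumulator by a right-to-left
-- pass merging adjacent empty pairs (output built back-to-front) plus a separate
-- filter pass dropping zero-total empty runs (alternative; same cost).

-- ===== PORT A =====
-- the for-loop over disk_map with state (unemptied, running_count)
def combineLoopA : List (Int × Int) → List (Int × Int) × Int → List (Int × Int) × Int
  | [], st => st
  | pair :: rest, (unemptied, running_count) =>
    if pair.2 ≠ -1 then
      combineLoopA rest
        ((if running_count ≠ 0 then unemptied ++ [(running_count, -1)] else unemptied) ++ [pair], 0)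
    else
      combineLoopA rest (unemptied, running_count + pair.1)

def combine_empties (disk_map : List (Int × Int)) : List (Int × Int) :=
  let st := combineLoopA disk_map ([], 0)
  if st.2 ≠ 0 then st.1 ++ [(st.2, -1)] else st.1

-- ===== PORT B =====
-- one step of B's reversed-traversal loop: 'merged' is the output built so far
-- (its head is the pair immediately to the right of p in the original list);
-- the Python appends at the end of a reversed buffer and reverses at the end,
-- which is exactly a right fold with this step.
def mergeStep (p : Int × Int) (merged : List (Int × Int)) : List (Int × Int) :=
  match merged with
  | q :: rest => if p.2 = -1 ∧ q.2 = -1 then (q.1 + p.1, -1) :: rest else p :: merged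
  | [] => p :: merged

def combine_empties_alt (disk_map : List (Int × Int)) : List (Int × Int) :=
  (disk_map.foldr mergeStep []).filter (fun p => p ≠ (0, -1))

-- ===== PRECONDITION & SPEC =====
def Spec_combine_empties (disk_map : List (Int × Int)) (out : List (Int × Int)) : Prop := out = combine_empties_alt disk_map
instance (disk_map : List (Int × Int)) (out : List (Int × Int)) : Decidable (Spec_combine_empties disk_map out) := by unfold Spec_combine_empties; infer_instance

-- ===== CLAIM (what is proved, stated in full; the proofs are below) =====
def Claim_equal_combine_empties : Prop := ∀ (disk_map : List (Int × Int)), Dom_combine_empties disk_map → Spec_combine_empties disk_map (combine_empties disk_map)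

-- ===== LEMMAS AND PROOFS =====

-- prepending a non-empty pair just prepends it to B's output
theorem alt_cons_ne (p : Int × Int) (l : List (Int × Int)) (h : ¬ p.2 = -1) :
    combine_empties_alt (p :: l) = p :: combine_empties_alt l := by
  unfold combine_empties_alt
  have hp : p ≠ (0, -1) := by intro hc; rw [hc] at h; exact h rfl
  cases hm : l.foldr mergeStep [] with
  | nil => simp [mergeStep, hm, hp]
  | cons q rest => simp [mergeStep, hm, h, hp]

-- merging two leading empty pairs into one does not change B's output
theorem alt_cons_empty (rc c : Int) (l : List (Int × Int)) :
    combine_empties_alt ((rc, -1) :: (c, -1) :: l) = combine_empties_alt ((rc + c, -1) :: l) := by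
  unfold combine_empties_alt
  cases hm : l.foldr mergeStep [] with
  | nil => simp [mergeStep, hm, add_comm]
  | cons q rest =>
    by_cases hq : q.2 = -1
    · simp [mergeStep, hm, hq, add_comm, add_left_comm]
    · simp [mergeStep, hm, hq, add_comm]

-- a leading empty pair of count 0 is invisible to B
theorem alt_cons_zero (l : List (Int × Int)) :
    combine_empties_alt ((0, -1) :: l) = combine_empties_alt l := by
  unfold combine_empties_alt
  cases hm : l.foldr mergeStep [] with
  | nil => simp [mergeStep, hm]
  | cons q rest =>
    obtain ⟨a, b⟩ := q
    by_cases hq : b = -1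
    · subst hq; simp [mergeStep, hm]
    · simp [mergeStep, hm, hq]

-- a leading empty pair before a non-empty pair splits off as its own entry
theorem alt_empty_then_ne (rc : Int) (p : Int × Int) (l : List (Int × Int))
    (h : ¬ p.2 = -1) :
    combine_empties_alt ((rc, -1) :: p :: l) =
      (if rc ≠ 0 then [(rc, -1)] else []) ++ combine_empties_alt (p :: l) := by
  unfold combine_empties_alt
  have hfold : ((p :: l).foldr mergeStep []) = mergeStep p (l.foldr mergeStep []) := rfl
  have hcons : ∃ rest, mergeStep p (l.foldr mergeStep []) = p :: rest := by
    cases l.foldr mergeStep [] with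
    | nil => exact ⟨[], rfl⟩
    | cons q r => by_cases hq : q.2 = -1 <;> simp [mergeStep, h, hq]
  obtain ⟨rest, hr⟩ := hcons
  rw [List.foldr_cons, hfold, hr]
  simp only [mergeStep]
  by_cases hrc : rc = 0
  · subst hrc; simp [h]
  · simp [h, hrc]

-- A's loop accumulator distributes over the prefix
theorem combineLoopA_acc (l : List (Int × Int)) (un : List (Int × Int)) (rc : Int) :
    combineLoopA l (un, rc) =
      (un ++ (combineLoopA l ([], rc)).1, (combineLoopA l ([], rc)).2) := by
  induction l generalizing un rc with
  | nil => simp [combineLoopA]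
  | cons p rest ih =>
    by_cases hp : p.2 ≠ -1
    · simp only [combineLoopA, if_pos hp]
      rw [ih, ih ((if rc ≠ 0 then [] ++ [(rc, -1)] else []) ++ [p]) 0]
      split_ifs <;> simp
    · simp only [combineLoopA, if_neg hp]
      exact ih un (rc + p.1)

-- main invariant: A's loop from state ([], rc) computes B on (rc, -1) :: l
theorem loopA_main (l : List (Int × Int)) (rc : Int) :
    (if (combineLoopA l ([], rc)).2 ≠ 0
      then (combineLoopA l ([], rc)).1 ++ [((combineLoopA l ([], rc)).2, -1)]
      else (combineLoopA l ([], rc)).1)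
    = combine_empties_alt ((rc, -1) :: l) := by
  induction l generalizing rc with
  | nil =>
    simp only [combineLoopA]
    unfold combine_empties_alt
    by_cases h : rc = 0
    · subst h; simp [mergeStep]
    · have : ((rc, -1) : Int × Int) ≠ (0, -1) := by simp [h]
      simp [mergeStep, h, this]
  | cons p rest ih =>
    by_cases hp : p.2 ≠ -1
    · simp only [combineLoopA, if_pos hp]
      rw [combineLoopA_acc, alt_empty_then_ne rc p rest hp, alt_cons_ne p rest hp]
      have h0 := ih 0
      rw [alt_cons_zero] at h0
      rw [← h0]
      split_ifs <;> simp
    · have hp2 : p.2 = -1 := by omega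
      have hpe : p = (p.1, -1) := by rw [← hp2]
      simp only [combineLoopA, if_neg hp]
      rw [ih (rc + p.1), hpe, alt_cons_empty]

-- ===== VERDICT (by name: the statement is the Claim_ definition above) =====
theorem combine_empties_spec : Claim_equal_combine_empties := by
  intro disk_map _
  unfold Spec_combine_empties combine_empties
  have h := loopA_main disk_map 0
  rw [alt_cons_zero] at h
  exact h
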